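-- pv_equiv track=rewrite | github.com/pctwass/ONEP | utils/streaming/stream_matcher.py | _match_entry_ids_match_samples
-- ===== SOURCE A (Python) =====
-- def _match_entry_ids_match_samples(feature_ids : enumerate, auxiliary_ids : enumerate) -> list[int, int]:
--     matching_indeces = []
--
--     for label_index, sample_id in enumerate(auxiliary_ids):
--         matching_feature_indices = [feature_index for feature_index, feature_id in enumerate(feature_ids) if feature_id == sample_id]
--         for feature_index in matching_feature_indices:
--             matching_indeces.append((feature_index, label_index))
--
--     # sort by the order of feature indices, otherwise the feature data order gets mixed up
--     matching_indeces = sorted(matching_indeces, key=lambda feature_index: feature_index[0])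
--     return matching_indeces
-- ===== SOURCE B (Python) =====
-- def _match_entry_ids_match_samples(feature_ids, auxiliary_ids):
--     # Group auxiliary (label) indices by id once, then emit pairs in feature order:
--     # output is already sorted by feature index with label indices ascending, so no sort is needed.
--     by_id = {}
--     for label_index, sample_id in enumerate(auxiliary_ids):
--         by_id.setdefault(sample_id, []).append(label_index)
--     matching_indeces = []
--     for feature_index, feature_id in enumerate(feature_ids):
--         for label_index in by_id.get(feature_id, []):
--             matching_indeces.append((feature_index, label_index))
--     return matching_indeces
-- ===== Notes on version B (the rewrite author's own statement) =====
-- stated objective: alternative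
-- what changed: Replaced the per-auxiliary-sample rescan of feature_ids plus final sort by a single dict pass grouping auxiliary indices by id followed by one pass over feature_ids that emits the pairs already in sorted order (no sort).
import Mathlib
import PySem

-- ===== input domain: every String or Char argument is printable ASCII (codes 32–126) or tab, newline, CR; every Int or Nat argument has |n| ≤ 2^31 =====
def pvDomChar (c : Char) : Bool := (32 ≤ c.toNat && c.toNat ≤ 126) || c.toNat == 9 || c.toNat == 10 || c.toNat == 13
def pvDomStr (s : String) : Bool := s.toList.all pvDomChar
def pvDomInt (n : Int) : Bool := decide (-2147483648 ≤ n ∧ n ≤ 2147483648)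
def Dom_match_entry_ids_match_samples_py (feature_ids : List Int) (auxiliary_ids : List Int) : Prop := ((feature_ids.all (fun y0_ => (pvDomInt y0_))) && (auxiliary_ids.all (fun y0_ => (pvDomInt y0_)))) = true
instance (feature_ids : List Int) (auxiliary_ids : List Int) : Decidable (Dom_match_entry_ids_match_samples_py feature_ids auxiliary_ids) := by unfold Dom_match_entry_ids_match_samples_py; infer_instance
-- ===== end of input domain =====

-- B groups auxiliary indices by id in one dict pass and emits pairs in feature order (already sorted by
-- construction, so no sort step): a different algorithm from A's per-sample rescan of feature_ids plus final sort.


-- ===== PORT A =====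
def match_entry_ids_match_samples_py (feature_ids : List Int) (auxiliary_ids : List Int) : List (Int × Int) :=
  let matching_indeces : List (Int × Int) :=
    (PySem.List.enumerate auxiliary_ids).foldl (fun acc lj =>
      let matching_feature_indices : List Int :=
        ((PySem.List.enumerate feature_ids).filter (fun fi => fi.2 == lj.2)).map (fun fi => fi.1)
      matching_feature_indices.foldl (fun acc2 i => acc2 ++ [(i, lj.1)]) acc) []
  PySem.List.sorted matching_indeces (fun p => p.1) false

-- ===== PORT B =====
def match_entry_ids_match_samples_py_alt (feature_ids : List Int) (auxiliary_ids : List Int) : List (Int × Int) :=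
  let by_id : PySem.Dict Int (List Int) :=
    (PySem.List.enumerate auxiliary_ids).foldl
      (fun d lj => d.modify lj.2 [] (· ++ [lj.1])) PySem.Dict.empty
  (PySem.List.enumerate feature_ids).foldl (fun acc fi =>
    (by_id.getD fi.2 []).foldl (fun acc2 j => acc2 ++ [(fi.1, j)]) acc) []

-- ===== PRECONDITION & SPEC =====
def Spec_match_entry_ids_match_samples_py (feature_ids : List Int) (auxiliary_ids : List Int) (out : List (Int × Int)) : Prop := out = match_entry_ids_match_samples_py_alt feature_ids auxiliary_ids
instance (feature_ids : List Int) (auxiliary_ids : List Int) (out : List (Int × Int)) : Decidable (Spec_match_entry_ids_match_samples_py feature_ids auxiliary_ids out) := by unfold Spec_match_entry_ids_match_samples_py; infer_instance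

-- ===== CLAIM (what is proved, stated in full; the proofs are below) =====
def Claim_equal_match_entry_ids_match_samples_py : Prop := ∀ (feature_ids : List Int) (auxiliary_ids : List Int), Dom_match_entry_ids_match_samples_py feature_ids auxiliary_ids → Spec_match_entry_ids_match_samples_py feature_ids auxiliary_ids (match_entry_ids_match_samples_py feature_ids auxiliary_ids)

-- ===== LEMMAS AND PROOFS =====

-- strict lexicographic order on pairs, and the "equal firsts come in increasing snd order" invariant
def pvLexLT (a b : Int × Int) : Prop := a.1 < b.1 ∨ (a.1 = b.1 ∧ a.2 < b.2)
def pvP (a b : Int × Int) : Prop := a.1 = b.1 → a.2 < b.2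

-- the unsorted pair list A builds, row by auxiliary sample
def pvRow (feature_ids : List Int) (lj : Int × Int) : List (Int × Int) :=
  ((PySem.List.enumerate feature_ids).filter (fun fi => fi.2 == lj.2)).map (fun fi => (fi.1, lj.1))

def pvL (feature_ids auxiliary_ids : List Int) : List (Int × Int) :=
  (PySem.List.enumerate auxiliary_ids).flatMap (pvRow feature_ids)

-- the label indices B's dict stores for id v
def pvLabels (auxiliary_ids : List Int) (v : Int) : List Int :=
  ((PySem.List.enumerate auxiliary_ids).filter (fun lj => lj.2 == v)).map (fun lj => lj.1)

def pvR (feature_ids auxiliary_ids : List Int) : List (Int × Int) :=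
  (PySem.List.enumerate feature_ids).flatMap (fun fi => (pvLabels auxiliary_ids fi.2).map (fun j => (fi.1, j)))

-- generic: append-singleton fold from an accumulator is append-of-map
theorem pv_foldl_app {α γ : Type} (g : α → γ) (xs : List α) (acc : List γ) :
    xs.foldl (fun acc2 x => acc2 ++ [g x]) acc = acc ++ xs.map g := by
  induction xs generalizing acc with
  | nil => simp
  | cons x xs ih => simp [List.foldl_cons, ih, List.append_assoc]

-- generic: nested fold appending one pair per inner element is a flatMap of maps
theorem pv_foldl_flat2 {α β γ : Type} (F : α → List β) (g : α → β → γ) (xs : List α) (acc : List γ) :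
    xs.foldl (fun a x => (F x).foldl (fun a2 y => a2 ++ [g x y]) a) acc
    = acc ++ xs.flatMap (fun x => (F x).map (g x)) := by
  induction xs generalizing acc with
  | nil => simp
  | cons x xs ih =>
    rw [List.foldl_cons, pv_foldl_app, ih, List.flatMap_cons]
    simp [List.append_assoc]

theorem pvA_eq (f a : List Int) :
    match_entry_ids_match_samples_py f a = PySem.List.sorted (pvL f a) (fun p => p.1) false := by
  unfold match_entry_ids_match_samples_py pvL pvRow
  rw [pv_foldl_flat2 (fun lj : Int × Int =>
        ((PySem.List.enumerate f).filter (fun fi => fi.2 == lj.2)).map (fun fi => fi.1))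
      (fun lj i => (i, lj.1))]
  simp [List.map_map, Function.comp_def]

theorem pv_byid (a : List Int) (v : Int) :
    ((PySem.List.enumerate a).foldl
      (fun d lj => d.modify lj.2 [] (· ++ [lj.1])) PySem.Dict.empty).getD v []
    = pvLabels a v := by
  have hmap : (PySem.List.enumerate a).foldl
      (fun d lj => d.modify lj.2 [] (· ++ [lj.1])) PySem.Dict.empty
      = ((PySem.List.enumerate a).map Prod.swap).foldl
        (fun d p => d.modify p.1 [] (· ++ [p.2])) PySem.Dict.empty := by
    rw [List.foldl_map]
    simp
  rw [hmap, PySem.Dict.getD_foldl_modify_append]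
  unfold pvLabels
  simp [List.filter_map, List.map_map, Function.comp_def, Prod.swap]

theorem pvB_eq (f a : List Int) :
    match_entry_ids_match_samples_py_alt f a = pvR f a := by
  unfold match_entry_ids_match_samples_py_alt pvR
  have h := pv_foldl_flat2
    (fun fi : Int × Int => (((PySem.List.enumerate a).foldl
        (fun d lj => d.modify lj.2 [] (· ++ [lj.1])) PySem.Dict.empty).getD fi.2 []))
    (fun fi j => (fi.1, j)) (PySem.List.enumerate f) []
  simp only [List.nil_append] at h
  rw [h]
  congr 1; funext fi
  rw [pv_byid]

-- perm: a flatMap over pairs in either nesting order gives permuted lists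
theorem pv_flatMap_append_perm {α γ : Type} (ys : List α) (F G : α → List γ) :
    (ys.flatMap fun b => F b ++ G b).Perm (ys.flatMap F ++ ys.flatMap G) := by
  induction ys with
  | nil => simp
  | cons b ys ih =>
    simp only [List.flatMap_cons]
    have h1 : (G b ++ (ys.flatMap F ++ ys.flatMap G)).Perm
        (ys.flatMap F ++ (G b ++ ys.flatMap G)) := by
      rw [← List.append_assoc, ← List.append_assoc]
      exact List.perm_append_comm.append_right _
    refine (ih.append_left (F b ++ G b)).trans ?_
    rw [List.append_assoc]
    exact (h1.append_left (F b)).trans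
      (List.Perm.of_eq (List.append_assoc (F b) (ys.flatMap F) (G b ++ ys.flatMap G)).symm)

theorem pv_flatMap_comm {α β γ : Type} (xs : List α) (ys : List β) (t : α → β → List γ) :
    (xs.flatMap fun x => ys.flatMap fun y => t x y).Perm
    (ys.flatMap fun y => xs.flatMap fun x => t x y) := by
  induction xs with
  | nil => simp
  | cons x xs ih =>
    simp only [List.flatMap_cons]
    refine List.Perm.trans (List.Perm.append_left _ ih) ?_
    exact (pv_flatMap_append_perm ys (t x) (fun y => xs.flatMap fun x => t x y)).symm

-- filter-then-map as a flatMap of an if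
theorem pv_filter_map_flat {α γ : Type} (p : α → Bool) (g : α → γ) (l : List α) :
    (l.filter p).map g = l.flatMap (fun x => if p x then [g x] else []) := by
  induction l with
  | nil => rfl
  | cons x l ih => by_cases h : p x <;> simp [h, ih]

theorem pv_perm (f a : List Int) : (pvR f a).Perm (pvL f a) := by
  have hR : pvR f a = (PySem.List.enumerate f).flatMap (fun fi =>
      (PySem.List.enumerate a).flatMap (fun lj =>
        if lj.2 == fi.2 then [(fi.1, lj.1)] else [])) := by
    unfold pvR pvLabels
    congr 1; funext fi
    rw [List.map_map, pv_filter_map_flat]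
    rfl
  have hL : pvL f a = (PySem.List.enumerate a).flatMap (fun lj =>
      (PySem.List.enumerate f).flatMap (fun fi =>
        if fi.2 == lj.2 then [(fi.1, lj.1)] else [])) := by
    unfold pvL pvRow
    congr 1; funext lj
    rw [pv_filter_map_flat]
  rw [hR, hL]
  refine (pv_flatMap_comm (PySem.List.enumerate f) (PySem.List.enumerate a)
    (fun fi lj => if lj.2 == fi.2 then [(fi.1, lj.1)] else [])).trans ?_
  apply List.Perm.of_eq
  congr 1; funext lj
  congr 1; funext fi
  by_cases h : fi.2 = lj.2
  · simp [h]
  · have h' : ¬ (lj.2 = fi.2) := fun hh => h hh.symm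
    simp [beq_iff_eq, h, h']

-- R is strictly lex-sorted
theorem pv_labels_pairwise (a : List Int) (v : Int) : (pvLabels a v).Pairwise (· < ·) := by
  unfold pvLabels
  rw [List.pairwise_map]
  exact ((PySem.List.pairwise_lt_enumerate a 0).filter _).imp (fun h => h)

theorem pvR_pairwise (f a : List Int) : (pvR f a).Pairwise pvLexLT := by
  unfold pvR
  rw [List.pairwise_flatMap]
  constructor
  · intro fi _
    refine (pv_labels_pairwise a fi.2).map _ ?_
    intro x y hxy
    exact Or.inr ⟨rfl, hxy⟩
  · refine (PySem.List.pairwise_lt_enumerate f 0).imp ?_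
    intro p q hpq x hx y hy
    simp only [List.mem_map] at hx hy
    obtain ⟨jx, _, rfl⟩ := hx
    obtain ⟨jy, _, rfl⟩ := hy
    exact Or.inl hpq

-- L satisfies the stability invariant pvP
theorem pvL_pairwise (f a : List Int) : (pvL f a).Pairwise pvP := by
  unfold pvL
  rw [List.pairwise_flatMap]
  constructor
  · intro lj _
    unfold pvRow
    rw [List.pairwise_map]
    refine ((PySem.List.pairwise_lt_enumerate f 0).filter _).imp ?_
    intro x y hxy h
    exact absurd h (by simpa using Int.ne_of_lt hxy)
  · refine (PySem.List.pairwise_lt_enumerate a 0).imp ?_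
    intro p q hpq x hx y hy
    unfold pvRow at hx hy
    simp only [List.mem_map] at hx hy
    obtain ⟨fx, _, rfl⟩ := hx
    obtain ⟨fy, _, rfl⟩ := hy
    intro _; exact hpq

-- inserting x after all its equal-key predecessors keeps strict lex sortedness
theorem pv_insertBy_lex (x : Int × Int) (acc : List (Int × Int))
    (hacc : acc.Pairwise pvLexLT) (hx : ∀ y ∈ acc, pvP y x) :
    (PySem.List.insertBy (fun a b => decide (a.1 < b.1)) x acc).Pairwise pvLexLT := by
  induction acc with
  | nil => simp [PySem.List.insertBy]
  | cons a as ih =>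
    rw [List.pairwise_cons] at hacc
    obtain ⟨ha, has⟩ := hacc
    show (if (decide (x.1 < a.1)) = true then x :: a :: as
          else a :: PySem.List.insertBy (fun a b => decide (a.1 < b.1)) x as).Pairwise pvLexLT
    by_cases hlt : x.1 < a.1
    · simp only [hlt, decide_true, if_true]
      refine List.Pairwise.cons ?_ (List.Pairwise.cons ha has)
      intro z hz
      rcases List.mem_cons.mp hz with rfl | hz
      · exact Or.inl hlt
      · rcases ha z hz with h1 | ⟨h1, _⟩
        · exact Or.inl (lt_trans hlt h1)
        · exact Or.inl (h1 ▸ hlt)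
    · simp only [hlt, decide_false]
      refine List.Pairwise.cons ?_ (ih has (fun y hy => hx y (List.mem_cons_of_mem a hy)))
      intro z hz
      rw [PySem.List.mem_insertBy] at hz
      rcases hz with rfl | hz
      · rcases lt_or_eq_of_le (le_of_not_gt hlt) with h1 | h1
        · exact Or.inl h1
        · exact Or.inr ⟨h1, hx a (List.mem_cons_self) h1⟩
      · exact ha z hz

theorem pv_sorted_lex (xs : List (Int × Int)) (hxs : xs.Pairwise pvP) :
    (PySem.List.sorted xs (fun p => p.1) false).Pairwise pvLexLT := by
  rw [PySem.List.sorted_eq_foldl_insertBy]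
  suffices h : ∀ (l : List (Int × Int)) (acc : List (Int × Int)),
      acc.Pairwise pvLexLT → (∀ y ∈ acc, ∀ z ∈ l, pvP y z) → l.Pairwise pvP →
      (l.foldl (fun acc x => PySem.List.insertBy (fun a b => decide (a.1 < b.1)) x acc) acc).Pairwise pvLexLT by
    exact h xs [] List.Pairwise.nil (by simp) hxs
  intro l
  induction l with
  | nil => intro acc h _ _; exact h
  | cons x t ih =>
    intro acc hacc hcross hP
    rw [List.pairwise_cons] at hP
    obtain ⟨hxP, htP⟩ := hP
    simp only [List.foldl_cons]
    apply ih
    · exact pv_insertBy_lex x acc hacc (fun y hy => hcross y hy x List.mem_cons_self)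
    · intro y hy z hz
      rw [PySem.List.mem_insertBy] at hy
      rcases hy with rfl | hy
      · exact hxP z hz
      · exact hcross y hy z (List.mem_cons_of_mem x hz)
    · exact htP

-- ===== VERDICT (by name: the statement is the Claim_ definition above) =====
theorem match_entry_ids_match_samples_py_spec : Claim_equal_match_entry_ids_match_samples_py := by
  intro f a _
  show match_entry_ids_match_samples_py f a = match_entry_ids_match_samples_py_alt f a
  rw [pvA_eq, pvB_eq]
  have hperm : (PySem.List.sorted (pvL f a) (fun p => p.1) false).Perm (pvR f a) :=
    (PySem.List.sorted_perm (pvL f a) (fun p => p.1) false).trans (pv_perm f a).symm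
  refine List.eq_of_perm_of_sorted (le := pvLexLT) ?_ ?_ ?_ hperm
  · intro p q _ _ h1 h2
    rcases h1 with h1 | ⟨h1, h1'⟩ <;> rcases h2 with h2 | ⟨h2, h2'⟩ <;> omega
  · exact pv_sorted_lex (pvL f a) (pvL_pairwise f a)
  · exact pvR_pairwise f a
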